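-- pv_equiv track=rewrite | github.com/simon2x/Zippy-Ip-Scanner | zippyipscanner/mathfunctions.py | decimal_to_byte_list
-- ===== SOURCE A (Python) =====
-- def decimal_to_byte_list(d, retbytes):
--     if not isinstance(d, int):
--         raise ValueError("arg d must be an integer")
--     d = bin(d)[2:]
--     value = [0] * retbytes
--     n = -1
--     while (d):
--         v = d[-8:]
--         v = int(v, 2)
--         d = d[:-8]
--         value[n] = v
--         n -= 1
--     return value
-- ===== SOURCE B (Python) =====
-- def decimal_to_byte_list(d, retbytes):
--     if not isinstance(d, int):
--         raise ValueError("arg d must be an integer")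
--     if d < 0:
--         raise ValueError("arg d must be non-negative")
--     value = [0] * retbytes
--     n = retbytes - 1
--     while d:
--         value[n] = d & 0xFF
--         d >>= 8
--         n -= 1
--     return value
-- ===== Notes on version B (the rewrite author's own statement) =====
-- stated objective: alternative
-- what changed: Replaces A's binary-string construction and 8-character slice/parse loop with direct arithmetic (d & 0xFF, d >>= 8) filling the fixed-width list from the end, with an explicit guard rejecting negative d (where A raises ValueError via its malformed binary string).
import Mathlib
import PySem

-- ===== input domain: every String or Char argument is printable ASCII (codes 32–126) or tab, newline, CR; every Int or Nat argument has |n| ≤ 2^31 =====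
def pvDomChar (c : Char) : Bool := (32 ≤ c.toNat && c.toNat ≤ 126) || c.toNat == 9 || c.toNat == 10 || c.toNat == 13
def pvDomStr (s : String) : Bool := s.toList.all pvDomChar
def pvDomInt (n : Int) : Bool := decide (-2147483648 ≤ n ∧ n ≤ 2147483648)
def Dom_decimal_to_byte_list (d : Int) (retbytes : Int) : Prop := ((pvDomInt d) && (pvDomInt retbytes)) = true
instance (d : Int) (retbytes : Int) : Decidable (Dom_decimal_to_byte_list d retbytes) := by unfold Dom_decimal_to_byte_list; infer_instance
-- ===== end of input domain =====

-- B replaces A's binary-string slicing with byte arithmetic (d % 256, d >> 8); alternative decomposition, same cost.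


-- ===== PORT A =====
-- bin(n) without the '0b' prefix, for n > 0 (big-endian binary digits)
def binCore (n : Nat) : List Char :=
  if n = 0 then [] else binCore (n / 2) ++ [if n % 2 = 1 then '1' else '0']
decreasing_by exact Nat.div_lt_self (by omega) (by omega)

-- bin(d)[2:] for d ≥ 0; for d < 0 Python yields a string on which int(v,2) raises ValueError
-- (excluded by Pre_), so that branch's value is irrelevant — [] makes the loop exit at once.
def binPy (d : Int) : List Char :=
  if d < 0 then [] else if d = 0 then ['0'] else binCore d.toNat

-- int(v, 2) on a string of '0'/'1' characters (the only characters reached under Pre_)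
def parseBin (cs : List Char) : Nat :=
  cs.foldl (fun a c => 2 * a + (if c = '1' then 1 else 0)) 0

-- A's while loop: v = d[-8:]; v = int(v,2); d = d[:-8]; value[n] = v; n -= 1
-- (s[-8:] = drop (len-8), s[:-8] = take (len-8): exact Python slice semantics for these slices;
--  value[n] = v is PySem.List.pySetD — no-op exactly where Python raises IndexError, excluded by Pre_)
def aLoop (s : List Char) (value : List Int) (n : Int) : List Int :=
  if h : s = [] then value
  else
    aLoop (s.take (s.length - 8))
          (PySem.List.pySetD value n ((parseBin (s.drop (s.length - 8)) : Nat) : Int))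
          (n - 1)
termination_by s.length
decreasing_by
  simp only [List.length_take]
  have : s.length ≠ 0 := by simpa using h
  omega

def decimal_to_byte_list (d : Int) (retbytes : Int) : List Int :=
  aLoop (binPy d) (List.replicate retbytes.toNat 0) (-1)

-- ===== PORT B =====
-- B's while loop: value[n] = d & 0xFF; d >>= 8; n -= 1  (for d ≥ 0: d & 0xFF = d % 256, d >> 8 = d / 256)
def bLoop (d : Nat) (value : List Int) (n : Int) : List Int :=
  if d = 0 then value
  else bLoop (d / 256) (PySem.List.pySetD value n ((d % 256 : Nat) : Int)) (n - 1)
decreasing_by exact Nat.div_lt_self (by omega) (by omega)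

def decimal_to_byte_list_alt (d : Int) (retbytes : Int) : List Int :=
  if d < 0 then []  -- B raises ValueError here (excluded by Pre_)
  else bLoop d.toNat (List.replicate retbytes.toNat 0) (retbytes - 1)

-- ===== PRECONDITION & SPEC =====
-- A raises ValueError for d < 0 (malformed binary string) and IndexError when retbytes < 1
-- or d does not fit in retbytes bytes; Pre_ excludes exactly those inputs.
def Pre_decimal_to_byte_list (d : Int) (retbytes : Int) : Prop :=
  0 ≤ d ∧ 1 ≤ retbytes ∧ d < (256 : Int) ^ retbytes.toNat
instance (d : Int) (retbytes : Int) : Decidable (Pre_decimal_to_byte_list d retbytes) := by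
  unfold Pre_decimal_to_byte_list; infer_instance

def pvWitness_decimal_to_byte_list : Int × Int := (258, 2)

def Spec_decimal_to_byte_list (d : Int) (retbytes : Int) (out : List Int) : Prop := out = decimal_to_byte_list_alt d retbytes
instance (d : Int) (retbytes : Int) (out : List Int) : Decidable (Spec_decimal_to_byte_list d retbytes out) := by unfold Spec_decimal_to_byte_list; infer_instance

-- ===== CLAIM (what is proved, stated in full; the proofs are below) =====
def Claim_equal_decimal_to_byte_list : Prop := ∀ (d : Int) (retbytes : Int), Dom_decimal_to_byte_list d retbytes → Pre_decimal_to_byte_list d retbytes → Spec_decimal_to_byte_list d retbytes (decimal_to_byte_list d retbytes)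

-- ===== LEMMAS AND PROOFS =====

lemma binCore_zero : binCore 0 = [] := by unfold binCore; simp

lemma binCore_pos (n : Nat) (h : 0 < n) :
    binCore n = binCore (n / 2) ++ [if n % 2 = 1 then '1' else '0'] := by
  rw [binCore]; simp [Nat.pos_iff_ne_zero.mp h]

lemma binCore_eq_nil_iff (n : Nat) : binCore n = [] ↔ n = 0 := by
  constructor
  · intro h
    by_contra hn
    rw [binCore_pos n (Nat.pos_of_ne_zero hn)] at h
    simp at h
  · intro h; subst h; exact binCore_zero

lemma parseBin_append_bit (ys : List Char) (c : Char) :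
    parseBin (ys ++ [c]) = 2 * parseBin ys + (if c = '1' then 1 else 0) := by
  unfold parseBin
  rw [List.foldl_append]
  simp

-- dropping / keeping the last k binary digits of binCore d gives binCore (d / 2^k) / d % 2^k
lemma binCore_chunk (k : Nat) : ∀ d : Nat,
    (binCore d).take ((binCore d).length - k) = binCore (d / 2 ^ k) ∧
    parseBin ((binCore d).drop ((binCore d).length - k)) = d % 2 ^ k := by
  induction k with
  | zero =>
    intro d
    refine ⟨by simp, ?_⟩
    simp [parseBin, Nat.mod_one]
  | succ k ih =>
    intro d
    by_cases hd : d = 0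
    · subst hd; simp [binCore_zero, parseBin]
    · have hpos : 0 < d := Nat.pos_of_ne_zero hd
      rw [binCore_pos d hpos]
      set xs := binCore (d / 2) with hxs
      set c : Char := if d % 2 = 1 then '1' else '0' with hc
      have hsub : (xs ++ [c]).length - (k + 1) = xs.length - k := by simp
      have htk : xs.length - k ≤ xs.length := Nat.sub_le _ _
      obtain ⟨ih1, ih2⟩ := ih (d / 2)
      constructor
      · rw [hsub, List.take_append_of_le_length htk, ih1,
            Nat.div_div_eq_div_mul, pow_succ']
      · rw [hsub, List.drop_append_of_le_length htk, parseBin_append_bit, ih2]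
        have hbit : (if c = '1' then 1 else 0) = d % 2 := by
          rw [hc]
          rcases Nat.mod_two_eq_zero_or_one d with h | h <;> simp [h]
        rw [hbit, pow_succ, Nat.mul_comm (2 ^ k) 2, Nat.mod_mul]
        omega

-- index shift: Python's write at negative index n - len equals the write at n, for 0 ≤ n < len
lemma pySetD_shift (xs : List Int) (n : Nat) (v : Int) (h : n < xs.length) :
    PySem.List.pySetD xs ((n : Int) - xs.length) v = xs.set n v := by
  simp only [PySem.List.pySetD, PySem.List.pySet?, PySem.List.pyIdx?]
  split_ifs with h1 h2 h3
  · exfalso; omega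
  · exfalso; omega
  · simp only [Option.map_some, Option.getD_some]
    congr 1
    omega
  · exfalso; omega

-- main loop equivalence: A's string loop equals B's arithmetic loop
lemma loop_eq : ∀ d : Nat, ∀ value : List Int, ∀ n : Nat,
    0 < d → n < value.length → d < 256 ^ (n + 1) →
    aLoop (binCore d) value ((n : Int) - value.length) = bLoop d value (n : Int) := by
  intro d
  induction d using Nat.strong_induction_on with
  | _ d ih =>
    intro value n hd hn hfit
    have hne : binCore d ≠ [] := by
      rw [ne_eq, binCore_eq_nil_iff]; omega
    obtain ⟨htake, hdrop⟩ := binCore_chunk 8 d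
    have h256 : (2 : Nat) ^ 8 = 256 := by norm_num
    rw [h256] at htake hdrop
    rw [aLoop, dif_neg hne, htake, hdrop,
        bLoop, if_neg (by omega : ¬ d = 0),
        pySetD_shift value n _ hn,
        ← PySem.List.pySetD_natCast (xs := value) (n := n) (v := ((d % 256 : Nat) : Int))]
    set value' := PySem.List.pySetD value (n : Int) ((d % 256 : Nat) : Int) with hv'
    have hlen' : value'.length = value.length := PySem.List.length_pySetD ..
    by_cases hsmall : d / 256 = 0
    · rw [hsmall, binCore_zero, aLoop, bLoop]; simp
    · have hnpos : 0 < n := by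
        by_contra hn0
        have hn' : n = 0 := by omega
        subst hn'
        exact hsmall (Nat.div_eq_of_lt (by simpa using hfit))
      have hrec := ih (d / 256) (Nat.div_lt_self hd (by omega)) value' (n - 1)
        (Nat.pos_of_ne_zero hsmall)
        (by omega)
        (by
          have hlt : d / 256 < 256 ^ n := by
            rw [Nat.div_lt_iff_lt_mul (by omega)]
            calc d < 256 ^ (n + 1) := hfit
              _ = 256 ^ n * 256 := by rw [pow_succ]
          have hn1 : n - 1 + 1 = n := by omega
          rw [hn1]; exact hlt)
      have hc1 : ((n : Int) - value.length) - 1 = ((n - 1 : Nat) : Int) - value'.length := by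
        rw [hlen']; push_cast [Nat.cast_sub (by omega : 1 ≤ n)]; ring
      have hc2 : (n : Int) - 1 = ((n - 1 : Nat) : Int) := by
        push_cast [Nat.cast_sub (by omega : 1 ≤ n)]; ring
      rw [hc1, hc2, hrec]

-- ===== VERDICT (by name: the statement is the Claim_ definition above) =====
theorem decimal_to_byte_list_spec : Claim_equal_decimal_to_byte_list := by
  intro d retbytes _ hpre
  obtain ⟨hd, hr, hfit⟩ := hpre
  unfold Spec_decimal_to_byte_list decimal_to_byte_list decimal_to_byte_list_alt binPy
  have hdneg : ¬ d < 0 := by omega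
  set R := retbytes.toNat with hR
  have hR1 : 1 ≤ R := by omega
  have hlenR : (List.replicate R (0 : Int)).length = R := by simp
  simp only [hdneg, if_false]
  by_cases hd0 : d = 0
  · subst hd0
    simp only [if_true, Int.toNat_zero]
    rw [bLoop, if_pos rfl]
    rw [aLoop, dif_neg (by simp : ¬ (['0'] : List Char) = [])]
    have hp : parseBin ((['0'] : List Char).drop ((['0'] : List Char).length - 8)) = 0 := by decide
    have ht : (['0'] : List Char).take ((['0'] : List Char).length - 8) = [] := by decide
    rw [hp, ht, aLoop, dif_pos rfl]
    have hm1 : (-1 : Int) = (((R - 1 : Nat) : Int)) - (List.replicate R (0 : Int)).length := by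
      rw [hlenR]; push_cast [Nat.cast_sub hR1]; ring
    rw [hm1, Nat.cast_zero, pySetD_shift _ _ _ (by rw [hlenR]; omega),
        List.set_replicate_self]
  · have hdpos : 0 < d.toNat := by omega
    simp only [hd0, if_false]
    have hw : (-1 : Int) = ((R - 1 : Nat) : Int) - (List.replicate R (0 : Int)).length := by
      rw [hlenR]; push_cast [Nat.cast_sub hR1]; ring
    have hn : retbytes - 1 = ((R - 1 : Nat) : Int) := by
      push_cast [Nat.cast_sub hR1]
      rw [hR, Int.toNat_of_nonneg (by omega)]
    rw [hw, hn]
    apply loop_eq d.toNat _ (R - 1) hdpos (by rw [hlenR]; omega)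
    have hcast : d.toNat < 256 ^ R := by
      have h1 : ((d.toNat : Int)) < ((256 ^ R : Nat) : Int) := by
        rw [Int.toNat_of_nonneg hd]; push_cast; exact hfit
      exact_mod_cast h1
    have hRe : R - 1 + 1 = R := by omega
    rw [hRe]; exact hcast
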